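-- pv_equiv track=rewrite | github.com/zuke-as-Dev/dba_TensiStrength | sentistrength_bd_algo/dbapp/dbalgo_logic/single_function.py | new_word
-- ===== SOURCE A (Python) =====
-- def new_word(data:list):
--     final_list=data
--     words=[]
--     f_str=''
--     all_digits = ['0', '1', '2', '3', '4', '5', '6', '7', '8', '9']
--     all_digits_neg = ['1', '2', '3', '4', '5', '6', '7', '8', '9','0', '-1',   '-2', '-3', '-4', '-5', '-6', '-7', '-8', '-9']
--     for word in final_list:
--         word=word.rstrip()
--         total_digits=0
--         for s in word:
--             if s in all_digits and word[0:1] not in all_digits: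
--                 total_digits += 1
--         if total_digits==2:
--             f_str = f_str + str(word)+'\n'
--         elif total_digits==1:
--             f_str = f_str + str(word) + ' ' + word[-2:]+'\n'
--         elif total_digits==0:
--             pass
--     dataword = f_str.split('\n')
--     data_word = ''
--     for word in dataword:
--         word_list = word.split(' ')
--         sub = str(word_list[0])
--         data_word = data_word + sub +'\n'
--     words=(data_word.split())
--     return words
-- ===== SOURCE B (Python) =====
-- def new_word(data: list):
--     result = []
--     for word in data:
--         word = word.rstrip()
--         if word[:1].isdigit():
--             continue
--         if sum(c.isdigit() for c in word) in (1, 2):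
--             result.append(word)
--     return result
-- ===== Notes on version B (the rewrite author's own statement) =====
-- stated objective: simpler
-- what changed: B is a single filter pass that keeps each rstripped word with one or two digit characters and a non-digit first character, replacing A's pipeline of accumulating a newline-joined string and re-splitting it twice.
-- intended difference: On inputs where a qualifying word (rstripped, non-digit first char, one or two digits) still contains a whitespace character, A returns only the fragment(s) before the first space of each newline-piece of the word (possibly dropping it entirely, e.g. [' 1a'] -> []), an artefact of its join/re-split pipeline, while B returns the word intact, which is the intended 'keep this word' behaviour. — e.g. on new_word(["a b1"]): A returns ["a"], B returns ["a b1"]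
import Mathlib
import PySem

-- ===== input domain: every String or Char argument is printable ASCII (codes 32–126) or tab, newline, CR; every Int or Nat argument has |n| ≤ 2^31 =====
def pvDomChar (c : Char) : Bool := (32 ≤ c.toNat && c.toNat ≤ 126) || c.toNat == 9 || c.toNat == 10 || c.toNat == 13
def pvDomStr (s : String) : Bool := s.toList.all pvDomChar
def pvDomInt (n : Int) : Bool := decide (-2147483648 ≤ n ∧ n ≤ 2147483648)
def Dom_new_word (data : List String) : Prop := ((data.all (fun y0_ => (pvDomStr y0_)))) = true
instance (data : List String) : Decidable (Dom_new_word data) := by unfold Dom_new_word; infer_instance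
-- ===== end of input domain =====

-- B is a single filter pass (keep each rstripped word with 1 or 2 digits and a non-digit first
-- character) replacing A's build-a-string-and-resplit-it-twice pipeline; objective: simpler.
-- On words containing whitespace the two differ; see D_new_word below.

-- ===== PORT A =====
-- all_digits, a list of one-character strings
def pvAllDigits : List (List Char) :=
  [['0'], ['1'], ['2'], ['3'], ['4'], ['5'], ['6'], ['7'], ['8'], ['9']]

def new_word (data : List String) : List String :=
  -- f_str accumulation loop (all_digits_neg in A is unused dead code)
  let f_str : List Char := data.foldl (fun f_str word0 =>
    let word := PySem.Chars.rstrip word0.toList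
    let total : Int := word.foldl (fun total s =>
      if [s] ∈ pvAllDigits ∧ PySem.Chars.slice word (some 0) (some 1) ∉ pvAllDigits
      then total + 1 else total) 0
    if total = 2 then f_str ++ word ++ ['\n']
    else if total = 1 then
      f_str ++ word ++ [' '] ++ PySem.Chars.slice word (some (-2)) none ++ ['\n']
    else f_str) []
  let dataword := PySem.Chars.splitOn f_str ['\n']
  let data_word : List Char := dataword.foldl (fun acc w =>
    -- word_list[0]: str.split never returns an empty list, so headD is exact
    acc ++ (PySem.Chars.splitOn w [' ']).headD [] ++ ['\n']) []
  (PySem.Chars.split₀ data_word).map String.ofList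

-- ===== PORT B =====
def new_word_alt (data : List String) : List String :=
  (data.foldl (fun result word0 =>
    let word := PySem.Chars.rstrip word0.toList
    -- if word[:1].isdigit(): continue
    if PySem.Chars.strIsdigit (PySem.Chars.slice word (some 0) (some 1)) then result
    -- if sum(c.isdigit() for c in word) in (1, 2): result.append(word)
    else if word.countP PySem.Chars.isdigit = 1 ∨ word.countP PySem.Chars.isdigit = 2 then
      result ++ [word]
    else result) []).map String.ofList

-- ===== PRECONDITION & SPEC =====
-- a word "qualifies" when A/B emit something for it: first char not a digit, 1 or 2 digit chars
def pvQual (w : List Char) : Prop :=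
  PySem.Chars.strIsdigit (PySem.Chars.slice w (some 0) (some 1)) = false ∧
  (w.countP PySem.Chars.isdigit = 1 ∨ w.countP PySem.Chars.isdigit = 2)

-- On inputs where some qualifying word still contains a whitespace character after rstrip,
-- A returns only the whitespace-split fragment(s) before the first space of each newline-piece
-- of the word (possibly dropping it entirely), an artefact of its join/re-split pipeline,
-- while B returns the word intact, which is the intended "keep this word" behaviour.
def D_new_word (data : List String) : Prop :=
  ∃ w0 ∈ data, pvQual (PySem.Chars.rstrip w0.toList) ∧
    ∃ c ∈ PySem.Chars.rstrip w0.toList, PySem.Chars.isspace c = true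
instance (data : List String) : Decidable (D_new_word data) := by
  unfold D_new_word pvQual; infer_instance

def Spec_new_word (data : List String) (out : List String) : Prop :=
  ¬ D_new_word data → out = new_word_alt data
instance (data : List String) (out : List String) : Decidable (Spec_new_word data out) := by
  unfold Spec_new_word; infer_instance

def pvDiffWitness_new_word : List String := ["a b1"]
def pvDiffWitnessOut_new_word : (List String) × (List String) := (["a"], ["a b1"])

-- ===== CLAIM (what is proved, stated in full; the proofs are below) =====
def Claim_unchanged_new_word : Prop :=
  ∀ (data : List String), Dom_new_word data → Spec_new_word data (new_word data)
def Claim_changed_new_word : Prop :=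
  Dom_new_word (pvDiffWitness_new_word) ∧ D_new_word (pvDiffWitness_new_word) ∧
  new_word (pvDiffWitness_new_word) = pvDiffWitnessOut_new_word.1 ∧
  new_word_alt (pvDiffWitness_new_word) = pvDiffWitnessOut_new_word.2 ∧
  pvDiffWitnessOut_new_word.1 ≠ pvDiffWitnessOut_new_word.2
def Claim_exact_new_word : Prop :=
  ∀ (data : List String), Dom_new_word data → D_new_word data →
    new_word data ≠ new_word_alt data

-- ===== LEMMAS AND PROOFS =====

-- the first space-separated piece of p, and the tokens A derives from p
def pvFirst (p : List Char) : List Char := (PySem.Chars.splitOn p [' ']).headD []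
def pvG (p : List Char) : List (List Char) := PySem.Chars.split₀ (pvFirst p)

-- the line (if any) A appends to f_str for one input word
def pvLine (word0 : String) : Option (List Char) :=
  let word := PySem.Chars.rstrip word0.toList
  let total : Int :=
    if PySem.Chars.strIsdigit (PySem.Chars.slice word (some 0) (some 1)) then 0
    else (word.countP PySem.Chars.isdigit : Int)
  if total = 2 then some word
  else if total = 1 then some (word ++ [' '] ++ PySem.Chars.slice word (some (-2)) none)
  else none

def pvLineBlock (word0 : String) : List Char :=
  match pvLine word0 with
  | none => []
  | some l => l ++ ['\n']

-- the tokens A finally emits for one input word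
def pvFA (word0 : String) : List (List Char) :=
  match pvLine word0 with
  | none => []
  | some l => (PySem.Chars.splitOn l ['\n']).flatMap pvG

-- the word (if any) B emits for one input word
def pvFB (word0 : String) : List (List Char) :=
  let word := PySem.Chars.rstrip word0.toList
  if PySem.Chars.strIsdigit (PySem.Chars.slice word (some 0) (some 1)) then []
  else if word.countP PySem.Chars.isdigit = 1 ∨ word.countP PySem.Chars.isdigit = 2 then [word]
  else []

-- [s] ∈ all_digits is exactly isdigit s
theorem pv_digit_mem (s : Char) : [s] ∈ pvAllDigits ↔ PySem.Chars.isdigit s = true := by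
  constructor
  · intro h
    simp [pvAllDigits] at h
    rcases h with h|h|h|h|h|h|h|h|h|h <;> subst h <;> decide
  · intro h
    simp [PySem.Chars.isdigit, Char.le_def, UInt32.le_iff_toNat_le] at h
    have hval : s.toNat = 48 ∨ s.toNat = 49 ∨ s.toNat = 50 ∨ s.toNat = 51 ∨ s.toNat = 52 ∨
        s.toNat = 53 ∨ s.toNat = 54 ∨ s.toNat = 55 ∨ s.toNat = 56 ∨ s.toNat = 57 := by
      have hv : s.toNat = s.val.toNat := rfl
      rw [hv]
      omega
    have hs := (Char.ofNat_toNat s).symm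
    simp only [pvAllDigits, List.mem_cons]
    rcases hval with h|h|h|h|h|h|h|h|h|h <;> rw [h] at hs <;> simp [hs]

theorem pv_slice01 (w : List Char) : PySem.Chars.slice w (some 0) (some 1) = w.take 1 := by
  have := PySem.List.slice_natCast w 0 1
  simp at this
  simpa [PySem.Chars.slice] using this

theorem pv_first_digit (w : List Char) :
    PySem.Chars.slice w (some 0) (some 1) ∈ pvAllDigits ↔
    PySem.Chars.strIsdigit (PySem.Chars.slice w (some 0) (some 1)) = true := by
  rw [pv_slice01]
  cases w with
  | nil => simp [pvAllDigits, PySem.Chars.strIsdigit]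
  | cons c t =>
      simp only [List.take_succ_cons, List.take_zero]
      rw [pv_digit_mem]
      simp [PySem.Chars.strIsdigit]

-- A's digit-counting loop equals the closed count
theorem pv_count_eq (w : List Char) :
    (w.foldl (fun total s =>
      if [s] ∈ pvAllDigits ∧ PySem.Chars.slice w (some 0) (some 1) ∉ pvAllDigits
      then total + 1 else total) (0 : Int))
    = (if PySem.Chars.strIsdigit (PySem.Chars.slice w (some 0) (some 1)) then (0 : Int)
       else (w.countP PySem.Chars.isdigit : Int)) := by
  by_cases hd : PySem.Chars.slice w (some 0) (some 1) ∈ pvAllDigits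
  · rw [if_pos ((pv_first_digit w).mp hd)]
    have hbody : ∀ (total : Int) (s : Char),
        (if [s] ∈ pvAllDigits ∧ PySem.Chars.slice w (some 0) (some 1) ∉ pvAllDigits
         then total + 1 else total) = total := by
      intro t s; rw [if_neg]; exact fun hc => hc.2 hd
    rw [show (fun (total : Int) (s : Char) =>
        if [s] ∈ pvAllDigits ∧ PySem.Chars.slice w (some 0) (some 1) ∉ pvAllDigits
        then total + 1 else total) = (fun t _ => t) from funext fun t => funext fun s => hbody t s]
    simp
  · rw [if_neg (fun h => hd ((pv_first_digit w).mpr h))]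
    have hbody : ∀ (total : Int) (s : Char),
        (if [s] ∈ pvAllDigits ∧ PySem.Chars.slice w (some 0) (some 1) ∉ pvAllDigits
         then total + 1 else total)
        = (if PySem.Chars.isdigit s then total + 1 else total) := by
      intro t s
      by_cases h : PySem.Chars.isdigit s = true
      · rw [if_pos ⟨(pv_digit_mem s).mpr h, hd⟩, if_pos h]
      · rw [if_neg (fun hc => h ((pv_digit_mem s).mp hc.1)), if_neg h]
    rw [show (fun (total : Int) (s : Char) =>
        if [s] ∈ pvAllDigits ∧ PySem.Chars.slice w (some 0) (some 1) ∉ pvAllDigits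
        then total + 1 else total)
        = (fun t s => if PySem.Chars.isdigit s then t + 1 else t)
        from funext fun t => funext fun s => hbody t s]
    simpa using PySem.List.foldl_count_if PySem.Chars.isdigit w 0

-- A's f_str loop in closed form
theorem pv_fstr (data : List String) (acc : List Char) :
    data.foldl (fun f_str word0 =>
      let word := PySem.Chars.rstrip word0.toList
      let total : Int := word.foldl (fun total s =>
        if [s] ∈ pvAllDigits ∧ PySem.Chars.slice word (some 0) (some 1) ∉ pvAllDigits
        then total + 1 else total) 0
      if total = 2 then f_str ++ word ++ ['\n']
      else if total = 1 then
        f_str ++ word ++ [' '] ++ PySem.Chars.slice word (some (-2)) none ++ ['\n']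
      else f_str) acc
    = acc ++ data.flatMap pvLineBlock := by
  induction data generalizing acc with
  | nil => simp
  | cons w rest ih =>
      rw [List.foldl_cons, List.flatMap_cons, ih]
      simp only [pv_count_eq]
      unfold pvLineBlock pvLine
      simp only []
      split_ifs <;> simp [List.append_assoc]

-- splitOn.go equations and invariances (single-char separator)
theorem pv_sgo_zero (sep : Char) (l cur acc) :
    PySem.Chars.splitOn.go [sep] 0 l cur acc = ((cur.reverse ++ l) :: acc).reverse := by
  rw [PySem.Chars.splitOn.go]

theorem pv_sgo_nil (sep : Char) (f cur acc) :
    PySem.Chars.splitOn.go [sep] (f + 1) [] cur acc = (cur.reverse :: acc).reverse := by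
  rw [PySem.Chars.splitOn.go]
  omega

theorem pv_sgo_cons (sep : Char) (f : Nat) (c : Char) (rest cur acc) :
    PySem.Chars.splitOn.go [sep] (f + 1) (c :: rest) cur acc =
      if sep = c then PySem.Chars.splitOn.go [sep] f rest [] (cur.reverse :: acc)
      else PySem.Chars.splitOn.go [sep] f rest (c :: cur) acc := by
  rw [PySem.Chars.splitOn.go]
  simp [List.isPrefixOf]

theorem pv_sgo_acc (sep : Char) (f : Nat) (l cur acc) :
    PySem.Chars.splitOn.go [sep] f l cur acc
    = acc.reverse ++ PySem.Chars.splitOn.go [sep] f l cur [] := by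
  induction f generalizing l cur acc with
  | zero => simp [pv_sgo_zero]
  | succ f ih =>
      cases l with
      | nil => simp [pv_sgo_nil]
      | cons c rest =>
          rw [pv_sgo_cons, pv_sgo_cons]
          split_ifs
          · rw [ih rest [] (cur.reverse :: acc), ih rest [] [cur.reverse]]
            simp
          · rw [ih rest (c :: cur) acc]

theorem pv_sgo_fuel (sep : Char) (l : List Char) (f f' : Nat) (cur acc)
    (h : l.length < f) (h' : l.length < f') :
    PySem.Chars.splitOn.go [sep] f l cur acc = PySem.Chars.splitOn.go [sep] f' l cur acc := by
  induction l generalizing f f' cur acc with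
  | nil =>
      obtain ⟨f, rfl⟩ : ∃ g, f = g + 1 := ⟨f - 1, by omega⟩
      obtain ⟨f', rfl⟩ : ∃ g, f' = g + 1 := ⟨f' - 1, by omega⟩
      rw [pv_sgo_nil, pv_sgo_nil]
  | cons c rest ih =>
      obtain ⟨f, rfl⟩ : ∃ g, f = g + 1 := ⟨f - 1, by omega⟩
      obtain ⟨f', rfl⟩ : ∃ g, f' = g + 1 := ⟨f' - 1, by omega⟩
      simp only [List.length_cons] at h h'
      rw [pv_sgo_cons, pv_sgo_cons]
      split_ifs
      · exact ih _ _ _ _ (by omega) (by omega)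
      · exact ih _ _ _ _ (by omega) (by omega)

theorem pv_splitOn_append (sep : Char) (x y : List Char) :
    PySem.Chars.splitOn (x ++ sep :: y) [sep]
    = PySem.Chars.splitOn x [sep] ++ PySem.Chars.splitOn y [sep] := by
  unfold PySem.Chars.splitOn
  have main : ∀ (x : List Char) (f : Nat) (cur : List Char),
      x.length + y.length + 1 < f →
      PySem.Chars.splitOn.go [sep] f (x ++ sep :: y) cur []
      = PySem.Chars.splitOn.go [sep] (x.length + 1) x cur []
        ++ PySem.Chars.splitOn.go [sep] (y.length + 1) y [] [] := by
    intro x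
    induction x with
    | nil =>
        intro f cur hf
        obtain ⟨f, rfl⟩ : ∃ g, f = g + 1 := ⟨f - 1, by omega⟩
        simp only [List.nil_append, List.length_nil]
        rw [pv_sgo_cons]
        rw [if_pos rfl]
        rw [pv_sgo_nil]
        simp only [List.length_nil] at hf
        rw [pv_sgo_acc sep f y [] [cur.reverse],
          pv_sgo_fuel sep y f (y.length + 1) [] [] (by omega) (by omega)]
    | cons c rest ih =>
        intro f cur hf
        obtain ⟨f, rfl⟩ : ∃ g, f = g + 1 := ⟨f - 1, by omega⟩
        simp only [List.length_cons, List.cons_append]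
        rw [pv_sgo_cons, pv_sgo_cons]
        simp only [List.length_cons] at hf
        split_ifs
        · rw [pv_sgo_acc sep f (rest ++ sep :: y) [] [cur.reverse], ih f [] (by omega)]
          rw [pv_sgo_acc sep (rest.length + 1) rest [] [cur.reverse]]
          simp
        · exact ih f (c :: cur) (by omega)
  rw [pv_sgo_fuel sep (x ++ sep :: y) _ (x.length + y.length + 2) _ _ (by simp) (by simp; omega)]
  exact main x (x.length + y.length + 2) [] (by omega)

-- a separator-free string splits to itself
theorem pv_splitOn_single (sep : Char) (l : List Char) (h : sep ∉ l) :
    PySem.Chars.splitOn l [sep] = [l] := by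
  unfold PySem.Chars.splitOn
  have main : ∀ (l : List Char) (f : Nat) (cur : List Char), sep ∉ l → l.length < f →
      PySem.Chars.splitOn.go [sep] f l cur [] = [cur.reverse ++ l] := by
    intro l
    induction l with
    | nil =>
        intro f cur _ hf
        obtain ⟨f, rfl⟩ : ∃ g, f = g + 1 := ⟨f - 1, by omega⟩
        rw [pv_sgo_nil]; simp
    | cons c rest ih =>
        intro f cur hm hf
        obtain ⟨f, rfl⟩ : ∃ g, f = g + 1 := ⟨f - 1, by omega⟩
        rw [pv_sgo_cons]
        rw [if_neg (fun he => hm (by rw [he]; exact List.mem_cons_self ..))]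
        rw [ih f (c :: cur) (fun hc => hm (List.mem_cons_of_mem _ hc)) (by simp at hf ⊢; omega)]
        simp
  exact main l _ [] h (by omega)

-- splitting the concatenated f_str is splitting each line
theorem pv_splitOn_flat (data : List String) :
    PySem.Chars.splitOn (data.flatMap pvLineBlock) ['\n']
    = data.flatMap (fun w => match pvLine w with
        | none => []
        | some l => PySem.Chars.splitOn l ['\n']) ++ [[]] := by
  induction data with
  | nil => decide
  | cons w rest ih =>
      rw [List.flatMap_cons, List.flatMap_cons]
      cases h : pvLine w with
      | none => simp only [pvLineBlock, h]; simpa using ih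
      | some l =>
          simp only [pvLineBlock, h]
          rw [show (l ++ ['\n']) ++ rest.flatMap pvLineBlock
              = l ++ '\n' :: rest.flatMap pvLineBlock by simp]
          rw [pv_splitOn_append, ih, List.append_assoc]

theorem pv_dataword_fold (pieces : List (List Char)) (acc : List Char) :
    pieces.foldl (fun acc w => acc ++ (PySem.Chars.splitOn w [' ']).headD [] ++ ['\n']) acc
    = acc ++ pieces.flatMap (fun p => pvFirst p ++ ['\n']) := by
  induction pieces generalizing acc with
  | nil => simp
  | cons p rest ih => rw [List.foldl_cons, List.flatMap_cons, ih]; simp [pvFirst]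

-- split₀.go equations and invariances
theorem pv_wgo_nil (cur acc) :
    PySem.Chars.split₀.go [] cur acc
    = if cur.isEmpty then acc.reverse else (cur.reverse :: acc).reverse := by
  rw [PySem.Chars.split₀.go]

theorem pv_wgo_cons (c : Char) (rest cur acc) :
    PySem.Chars.split₀.go (c :: rest) cur acc =
      if PySem.Chars.isspace c then
        (if cur.isEmpty then PySem.Chars.split₀.go rest [] acc
         else PySem.Chars.split₀.go rest [] (cur.reverse :: acc))
      else PySem.Chars.split₀.go rest (c :: cur) acc := by
  rw [PySem.Chars.split₀.go]

theorem pv_wgo_acc (l cur acc) :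
    PySem.Chars.split₀.go l cur acc = acc.reverse ++ PySem.Chars.split₀.go l cur [] := by
  induction l generalizing cur acc with
  | nil => rw [pv_wgo_nil, pv_wgo_nil]; split_ifs <;> simp
  | cons c rest ih =>
      rw [pv_wgo_cons, pv_wgo_cons]
      split_ifs
      · rw [ih [] acc]
      · rw [ih [] (cur.reverse :: acc), ih [] [cur.reverse]]; simp
      · rw [ih (c :: cur) acc]

theorem pv_split₀_append (c : Char) (hc : PySem.Chars.isspace c = true) (x y : List Char) :
    PySem.Chars.split₀ (x ++ c :: y) = PySem.Chars.split₀ x ++ PySem.Chars.split₀ y := by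
  unfold PySem.Chars.split₀
  have main : ∀ (x cur : List Char),
      PySem.Chars.split₀.go (x ++ c :: y) cur []
      = PySem.Chars.split₀.go x cur [] ++ PySem.Chars.split₀.go y [] [] := by
    intro x
    induction x with
    | nil =>
        intro cur
        simp only [List.nil_append]
        rw [pv_wgo_cons, if_pos hc, pv_wgo_nil]
        split_ifs
        · simp
        · rw [pv_wgo_acc y [] [cur.reverse]]
    | cons d rest ih =>
        intro cur
        simp only [List.cons_append]
        rw [pv_wgo_cons, pv_wgo_cons]
        split_ifs
        · exact ih []
        · rw [pv_wgo_acc (rest ++ c :: y) [] [cur.reverse], ih [],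
            pv_wgo_acc rest [] [cur.reverse]]
          simp
        · exact ih (d :: cur)
  exact main x []

-- a nonempty all-non-space string is its own single token
theorem pv_split₀_single (l : List Char) (hne : l ≠ [])
    (h : ∀ c ∈ l, PySem.Chars.isspace c = false) :
    PySem.Chars.split₀ l = [l] := by
  unfold PySem.Chars.split₀
  have main : ∀ (l cur : List Char), (∀ c ∈ l, PySem.Chars.isspace c = false) →
      PySem.Chars.split₀.go l cur []
      = if (cur.reverse ++ l).isEmpty then [] else [cur.reverse ++ l] := by
    intro l
    induction l with
    | nil =>
        intro cur _
        rw [pv_wgo_nil]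
        cases cur <;> simp
    | cons c rest ih =>
        intro cur hm
        rw [pv_wgo_cons]
        rw [if_neg (by rw [hm c (List.mem_cons_self ..)]; simp)]
        rw [ih (c :: cur) (fun d hd => hm d (List.mem_cons_of_mem _ hd))]
        simp
  rw [main l [] h]
  simp [hne]

-- every token produced by split₀ is whitespace-free
theorem pv_split₀_nonspace (l : List Char) :
    ∀ t ∈ PySem.Chars.split₀ l, ∀ c ∈ t, PySem.Chars.isspace c = false := by
  unfold PySem.Chars.split₀
  have go : ∀ (l cur : List Char) (acc : List (List Char)),
      (∀ c ∈ cur, PySem.Chars.isspace c = false) →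
      (∀ t ∈ acc, ∀ c ∈ t, PySem.Chars.isspace c = false) →
      ∀ t ∈ PySem.Chars.split₀.go l cur acc, ∀ c ∈ t, PySem.Chars.isspace c = false := by
    intro l
    induction l with
    | nil =>
        intro cur acc hcur hacc t ht
        rw [pv_wgo_nil] at ht
        by_cases hce : cur.isEmpty
        · rw [if_pos hce] at ht
          simp at ht
          exact hacc t ht
        · rw [if_neg hce] at ht
          simp at ht
          rcases ht with ht | rfl
          · exact hacc t ht
          · intro c hc; exact hcur c (by simpa using hc)
    | cons d rest ih =>
        intro cur acc hcur hacc t ht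
        rw [pv_wgo_cons] at ht
        by_cases hd : PySem.Chars.isspace d = true
        · rw [if_pos hd] at ht
          split_ifs at ht
          · exact ih [] acc (by simp) hacc t ht
          · refine ih [] (cur.reverse :: acc) (by simp) ?_ t ht
            intro u hu
            rcases List.mem_cons.mp hu with rfl | hu
            · intro c hc; exact hcur c (by simpa using hc)
            · exact hacc u hu
        · rw [if_neg hd] at ht
          refine ih (d :: cur) acc ?_ hacc t ht
          intro c hc
          rcases List.mem_cons.mp hc with rfl | hc
          · simpa using hd
          · exact hcur c hc
  exact go l [] [] (by simp) (by simp)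

theorem pv_split₀_flat (pieces : List (List Char)) :
    PySem.Chars.split₀ (pieces.flatMap (fun p => pvFirst p ++ ['\n']))
    = pieces.flatMap pvG := by
  induction pieces with
  | nil => decide
  | cons p rest ih =>
      rw [List.flatMap_cons, List.flatMap_cons]
      rw [show (pvFirst p ++ ['\n']) ++ rest.flatMap (fun p => pvFirst p ++ ['\n'])
          = pvFirst p ++ '\n' :: rest.flatMap (fun p => pvFirst p ++ ['\n']) by simp]
      rw [pv_split₀_append '\n' (by decide), ih]
      rfl

-- A in closed form: one token list per input word
theorem pvA_closed (data : List String) :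
    new_word data = (data.flatMap pvFA).map String.ofList := by
  unfold new_word
  simp only [pv_fstr, List.nil_append]
  rw [pv_splitOn_flat, pv_dataword_fold, List.nil_append, pv_split₀_flat]
  rw [List.flatMap_append, List.flatMap_assoc]
  rw [show ([([] : List Char)].flatMap pvG) = [] by decide, List.append_nil]
  congr 1
  congr 1
  funext w
  unfold pvFA
  cases pvLine w <;> simp

-- B in closed form
theorem pvB_closed (data : List String) :
    new_word_alt data = (data.flatMap pvFB).map String.ofList := by
  unfold new_word_alt
  congr 1
  have main : ∀ (data : List String) (acc : List (List Char)),
      data.foldl (fun result word0 =>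
        let word := PySem.Chars.rstrip word0.toList
        if PySem.Chars.strIsdigit (PySem.Chars.slice word (some 0) (some 1)) then result
        else if word.countP PySem.Chars.isdigit = 1 ∨ word.countP PySem.Chars.isdigit = 2 then
          result ++ [word]
        else result) acc
      = acc ++ data.flatMap pvFB := by
    intro data
    induction data with
    | nil => intro acc; simp
    | cons w rest ih =>
        intro acc
        rw [List.foldl_cons, List.flatMap_cons, ih]
        unfold pvFB
        simp only []
        split_ifs <;> simp
  rw [main data []]
  simp

-- a slice of w only contains characters of w
theorem pv_mem_slice {c : Char} {w : List Char} (a? b? : Option Int)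
    (h : c ∈ PySem.Chars.slice w a? b?) : c ∈ w := by
  rw [PySem.Chars.slice_eq_listSlice] at h
  exact PySem.List.mem_of_mem_slice w a? b? h

-- flatMap only depends on the function's values on members
theorem pv_flatMap_congr {α β : Type} {f g : α → List β} (l : List α)
    (h : ∀ x ∈ l, f x = g x) : l.flatMap f = l.flatMap g := by
  induction l with
  | nil => rfl
  | cons x rest ih =>
      rw [List.flatMap_cons, List.flatMap_cons, h x (List.mem_cons_self ..),
        ih (fun y hy => h y (List.mem_cons_of_mem _ hy))]

-- the per-word agreement, away from whitespace-bearing qualifying words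
theorem pv_word_key (w : List Char)
    (h : ¬ (pvQual w ∧ ∃ c ∈ w, PySem.Chars.isspace c = true)) :
    (match (if (if PySem.Chars.strIsdigit (PySem.Chars.slice w (some 0) (some 1)) then (0 : Int)
                else (w.countP PySem.Chars.isdigit : Int)) = 2 then some w
            else if (if PySem.Chars.strIsdigit (PySem.Chars.slice w (some 0) (some 1)) then (0 : Int)
                else (w.countP PySem.Chars.isdigit : Int)) = 1 then
              some (w ++ [' '] ++ PySem.Chars.slice w (some (-2)) none)
            else none : Option (List Char)) with
      | none => ([] : List (List Char))
      | some l => (PySem.Chars.splitOn l ['\n']).flatMap pvG)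
    = (if PySem.Chars.strIsdigit (PySem.Chars.slice w (some 0) (some 1)) then ([] : List (List Char))
       else if w.countP PySem.Chars.isdigit = 1 ∨ w.countP PySem.Chars.isdigit = 2 then [w]
       else []) := by
  by_cases hdig : PySem.Chars.strIsdigit (PySem.Chars.slice w (some 0) (some 1)) = true
  · rw [if_pos hdig, if_pos hdig]
    simp
  · rw [if_neg hdig, if_neg hdig]
    have hdig' : PySem.Chars.strIsdigit (PySem.Chars.slice w (some 0) (some 1)) = false :=
      Bool.not_eq_true _ ▸ (by simpa using hdig)
    by_cases hq2 : w.countP PySem.Chars.isdigit = 2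
    · have hws : ∀ c ∈ w, PySem.Chars.isspace c = false := by
        intro c hc
        by_contra hcs
        exact h ⟨⟨hdig', Or.inr hq2⟩, c, hc, by simpa using hcs⟩
      have hne : w ≠ [] := by
        intro hnil; rw [hnil] at hq2; simp at hq2
      rw [if_pos (by exact_mod_cast hq2), if_pos (Or.inr hq2)]
      show (PySem.Chars.splitOn w ['\n']).flatMap pvG = [w]
      rw [pv_splitOn_single '\n' w (fun hm => absurd (hws '\n' hm) (by decide))]
      simp only [List.flatMap_cons, List.flatMap_nil, List.append_nil]
      unfold pvG pvFirst
      rw [pv_splitOn_single ' ' w (fun hm => absurd (hws ' ' hm) (by decide))]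
      simp only [List.headD_cons]
      rw [pv_split₀_single w hne hws]
    · by_cases hq1 : w.countP PySem.Chars.isdigit = 1
      · have hws : ∀ c ∈ w, PySem.Chars.isspace c = false := by
          intro c hc
          by_contra hcs
          exact h ⟨⟨hdig', Or.inl hq1⟩, c, hc, by simpa using hcs⟩
        have hne : w ≠ [] := by
          intro hnil; rw [hnil] at hq1; simp at hq1
        have hnsp : (' ' : Char) ∉ w := fun hm => absurd (hws ' ' hm) (by decide)
        rw [if_neg (by exact_mod_cast hq2), if_pos (by exact_mod_cast hq1),
          if_pos (Or.inl hq1)]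
        have hsln : ('\n' : Char) ∉ w ++ [' '] ++ PySem.Chars.slice w (some (-2)) none := by
          intro hm
          rcases List.mem_append.mp hm with hm | hm
          · rcases List.mem_append.mp hm with hm | hm
            · exact absurd (hws '\n' hm) (by decide)
            · simp at hm
          · exact absurd (hws '\n' (pv_mem_slice _ _ hm)) (by decide)
        show ((PySem.Chars.splitOn (w ++ [' '] ++ PySem.Chars.slice w (some (-2)) none) ['\n']).flatMap pvG) = [w]
        rw [pv_splitOn_single '\n' _ hsln]
        simp only [List.flatMap_cons, List.flatMap_nil, List.append_nil]
        unfold pvG pvFirst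
        rw [show w ++ [' '] ++ PySem.Chars.slice w (some (-2)) none
            = w ++ ' ' :: PySem.Chars.slice w (some (-2)) none by simp]
        rw [pv_splitOn_append ' ' w _, pv_splitOn_single ' ' w hnsp]
        simp only [List.cons_append, List.headD_cons]
        rw [pv_split₀_single w hne hws]
      · rw [if_neg (by exact_mod_cast hq2), if_neg (by exact_mod_cast hq1),
          if_neg (by intro hc; rcases hc with hc | hc; exact hq1 hc; exact hq2 hc)]

set_option maxRecDepth 10000 in
theorem pv_word_eq (w0 : String)
    (h : ¬ (pvQual (PySem.Chars.rstrip w0.toList) ∧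
      ∃ c ∈ PySem.Chars.rstrip w0.toList, PySem.Chars.isspace c = true)) :
    pvFA w0 = pvFB w0 := by
  unfold pvFA pvLine pvFB
  exact pv_word_key (PySem.Chars.rstrip w0.toList) h

-- ===== VERDICT (by name: the statements are the Claim_ definitions above) =====
theorem new_word_spec : Claim_unchanged_new_word := by
  intro data _
  unfold Spec_new_word
  intro hD
  rw [pvA_closed, pvB_closed, pv_flatMap_congr data
    (fun w0 hw0 => pv_word_eq w0 (fun hc => hD ⟨w0, hw0, hc.1, hc.2⟩))]

set_option maxRecDepth 10000 in
theorem new_word_changed : Claim_changed_new_word := by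
  unfold Claim_changed_new_word
  refine ⟨by decide, ?_, by decide, by decide, by decide⟩
  unfold pvDiffWitness_new_word D_new_word pvQual
  exact ⟨"a b1", by simp, ⟨by decide, Or.inl (by decide)⟩, ' ', by decide, by decide⟩

theorem new_word_tight : Claim_exact_new_word := by
  intro data _ hD heq
  obtain ⟨w0, hw0, hq, c, hc, hcs⟩ := hD
  have hB : String.ofList (PySem.Chars.rstrip w0.toList) ∈ new_word_alt data := by
    rw [pvB_closed]
    refine List.mem_map_of_mem (List.mem_flatMap.mpr ⟨w0, hw0, ?_⟩)
    unfold pvFB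
    simp only [hq.1]
    simp [hq.2]
  rw [← heq, pvA_closed] at hB
  obtain ⟨t, ht, hts⟩ := List.mem_map.mp hB
  have htw : t = PySem.Chars.rstrip w0.toList := by
    have := congrArg String.toList hts
    simpa using this
  obtain ⟨w1, _, htA⟩ := List.mem_flatMap.mp ht
  unfold pvFA at htA
  rcases hL : pvLine w1 with _ | l
  · rw [hL] at htA; simp at htA
  · rw [hL] at htA
    obtain ⟨p, _, htp⟩ := List.mem_flatMap.mp htA
    have := pv_split₀_nonspace (pvFirst p) t htp c (htw ▸ hc)
    simp [this] at hcs
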